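-- pv_equiv track=rewrite | github.com/BichengFan/image-algorithm | grayandcount.py | obtaincountgray
-- ===== SOURCE A (Python) =====
-- def obtaincountgray(grayMatrix):
--     graylist = list(range(0, 256))
--     countlist = []
--     grayandlist = []
--
--     for x in graylist:
--         tempcount = 0
--         for y in grayMatrix:
--             tempcount +=  y.count(x)
--         grayandlist.append([x, tempcount])
--         countlist.append(tempcount)
--     return graylist, countlist, grayandlist
-- ===== SOURCE B (Python) =====
-- def obtaincountgray(grayMatrix):
--     counts = {}
--     for row in grayMatrix:
--         for v in row:
--             counts[v] = counts.get(v, 0) + 1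
--     graylist = list(range(0, 256))
--     countlist = [counts.get(x, 0) for x in graylist]
--     grayandlist = [[x, counts.get(x, 0)] for x in graylist]
--     return graylist, countlist, grayandlist
-- ===== Notes on version B (the rewrite author's own statement) =====
-- stated objective: faster
-- what changed: Replaces the outer loop over all 256 gray values each rescanning the whole matrix with a single accumulation pass building a histogram dict, then a cheap pass over range(256) reading it.
import Mathlib
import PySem

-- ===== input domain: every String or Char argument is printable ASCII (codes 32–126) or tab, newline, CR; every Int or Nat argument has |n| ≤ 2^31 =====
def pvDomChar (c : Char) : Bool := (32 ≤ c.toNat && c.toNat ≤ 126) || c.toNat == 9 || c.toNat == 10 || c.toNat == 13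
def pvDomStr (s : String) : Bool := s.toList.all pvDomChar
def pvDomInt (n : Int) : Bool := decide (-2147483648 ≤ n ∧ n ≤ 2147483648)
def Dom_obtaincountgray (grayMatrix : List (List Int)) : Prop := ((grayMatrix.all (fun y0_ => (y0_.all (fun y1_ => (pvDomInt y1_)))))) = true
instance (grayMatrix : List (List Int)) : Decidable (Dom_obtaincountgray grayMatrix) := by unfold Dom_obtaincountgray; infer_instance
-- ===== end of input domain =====

-- B replaces A's 256 full-matrix rescans with one histogram-building pass plus a cheap readout pass (faster).


-- ===== PORT A =====
def obtaincountgray (grayMatrix : List (List Int)) : List Int × List Int × List (List Int) :=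
  let graylist := PySem.List.pyRange 0 256 1
  let res := graylist.foldl (fun (acc : List Int × List (List Int)) x =>
      let tempcount := grayMatrix.foldl (fun t y => t + (PySem.List.count y x : Int)) 0
      (acc.1 ++ [tempcount], acc.2 ++ [[x, tempcount]])) ([], [])
  (graylist, res.1, res.2)

-- ===== PORT B =====
def obtaincountgray_alt (grayMatrix : List (List Int)) : List Int × List Int × List (List Int) :=
  let counts := grayMatrix.foldl
      (fun (d : PySem.Dict Int Int) row => row.foldl (fun d v => d.insert v (d.getD v 0 + 1)) d)
      PySem.Dict.empty
  let graylist := PySem.List.pyRange 0 256 1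
  let countlist := graylist.map (fun x => counts.getD x 0)
  let grayandlist := graylist.map (fun x => [x, counts.getD x 0])
  (graylist, countlist, grayandlist)

-- ===== PRECONDITION & SPEC =====
def Spec_obtaincountgray (grayMatrix : List (List Int)) (out : List Int × List Int × List (List Int)) : Prop := out = obtaincountgray_alt grayMatrix
instance (grayMatrix : List (List Int)) (out : List Int × List Int × List (List Int)) : Decidable (Spec_obtaincountgray grayMatrix out) := by unfold Spec_obtaincountgray; infer_instance

-- ===== CLAIM (what is proved, stated in full; the proofs are below) =====
def Claim_equal_obtaincountgray : Prop := ∀ (grayMatrix : List (List Int)), Dom_obtaincountgray grayMatrix → Spec_obtaincountgray grayMatrix (obtaincountgray grayMatrix)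

-- ===== LEMMAS AND PROOFS =====

/-- B's nested histogram fold, read at any value, gives the matrix-wide count. -/
theorem getD_histogram (grayMatrix : List (List Int)) (d : PySem.Dict Int Int) (x : Int) :
    (grayMatrix.foldl (fun (d : PySem.Dict Int Int) row => row.foldl (fun d v => d.insert v (d.getD v 0 + 1)) d) d).getD x 0
      = d.getD x 0 + (grayMatrix.map (fun y => (PySem.List.count y x : Int))).sum := by
  induction grayMatrix generalizing d with
  | nil => simp
  | cons row rest ih =>
      simp only [List.foldl_cons, List.map_cons, List.sum_cons, ih,
        PySem.Dict.getD_foldl_insert_add_one, PySem.List.count_eq]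
      ring

-- ===== VERDICT (by name: the statement is the Claim_ definition above) =====
theorem obtaincountgray_spec : Claim_equal_obtaincountgray := by
  intro grayMatrix _
  unfold Spec_obtaincountgray obtaincountgray obtaincountgray_alt
  simp only [PySem.List.foldl_prod_mk
      (f := fun (acc : List Int) (x : Int) =>
        acc ++ [grayMatrix.foldl (fun t y => t + (PySem.List.count y x : Int)) 0])
      (g := fun (acc : List (List Int)) (x : Int) =>
        acc ++ [[x, grayMatrix.foldl (fun t y => t + (PySem.List.count y x : Int)) 0]]),
    PySem.List.foldl_append_singleton_eq_map, List.nil_append, Prod.mk.injEq]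
  refine ⟨trivial, ?_, ?_⟩ <;>
  · apply List.map_congr_left
    intro x _
    rw [PySem.List.foldl_add (g := fun y => (PySem.List.count y x : Int))]
    simp [getD_histogram]
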